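-- pv_equiv track=rewrite | github.com/spropst4/Decoupling-Gcode | 1DGC_Generate_SemiSpiral_Cylinder_Switching.py | setpress
-- ===== SOURCE A (Python) =====
-- def setpress(pressure):
--     # IMPORTS
--     from codecs import encode
--     from textwrap import wrap
--
--     pressure = str(pressure * 10)
--     length = len(pressure)
--     while length < 4:
--         pressure = "0" + pressure
--         length = len(pressure)
--
--     commandc = bytes(('08PS  ' + pressure), "utf-8")
--
--     # FIND CHECKSUM
--     startc = b'\x05\x02'
--     endc = b'\x03'
--
--     hexcommand = encode(commandc, "hex")  # encode should turn this into a hex rather than ascii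
--
--     hexcommand = hexcommand.decode("utf-8")  # decode should turn this into a string object rather than a bytes object
--
--     ####format for arduino#####
--     format_command = str(hexcommand)
--     format_command = '\\x'.join(format_command[i:i + 2] for i in range(0, len(format_command), 2))
--     format_command = '\\x' + format_command
--     ##########################
--
--     hexcommand = wrap(hexcommand,
--                       2)  # wrap should split the string into a horizontal array of strings of 2 characters each
--
--     # GETTING THE 8 BIT 2'S COMPLEMENT
--     decimalsum = 0
--     for i in hexcommand:  # get the decimal sum of the hex command
--         decimalsum = decimalsum + int(i, 16)
--     checksum = decimalsum % 256  # get the remainder of the decimal sum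
--     checksum = bin(checksum)  # turn into binary
--     checksum = checksum[2:]  # checksum is a string
--     while len(checksum) < 8:  # checksum must represents 8 bits of information
--         checksum = "0" + checksum
--     invert = ""
--     for i in checksum:  # binary sum must be inverted
--         if i == '0':
--             invert = invert + "1"
--         else:
--             invert = invert + "0"
--     invert = int(invert, 2)  # binary sum turned into decimal form
--     invert = invert + 1
--     # CHECKSUM HAS BEEN RETRIEVED IN DECIMAL FORM
--     checksum = invert
--     checksum = hex(checksum)  # checksum is in the format "0x##"
--     # CHECKSUM IS NOW IN ASCII FORM, don't be mislead by the hex function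
--     checksum = checksum[2:]
--     checksumarray = []
--     for i in checksum:  # must get alphabetical characters in uppercase for ascii to hex conversion
--         if i.isalpha():
--             i = i.upper()
--             checksumarray.append(i)
--         else:
--             checksumarray.append(i)
--     checksum = ""
--     for i in checksumarray:
--         checksum = checksum + i
--     # checksum is a string.
--     checksum = bytes(checksum, 'ascii')
--
--     ####format for arduino#####
--     hexchecksum = encode(checksum, 'hex')
--     hexchecksum = hexchecksum.decode("utf-8")  # decode should turn this into a string object rather than a bytes object
--     format_checksum = str(hexchecksum)  # format for arduino
--     format_checksum = '\\x'.join(format_checksum[i:i + 2] for i in range(0, len(format_checksum), 2))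
--     format_checksum = '\\x' + format_checksum
--
--     # SENDING OUT THE COMMAND
--     ##format for arduino####
--     finalcommand = ("\\x05\\x02") + format_command + format_checksum + str("\\x03")
--     finalcommand = finalcommand.strip('\r').strip('\n')
--     finalcommand = "b'" + finalcommand + "'"
--     return finalcommand
--
-- pressure = [28, 28] # 1 is core, 2 is shell
-- ===== SOURCE B (Python) =====
-- def setpress(pressure):
--     # same command bytes as the original
--     p = str(pressure * 10)
--     p = "0" * (4 - len(p)) + p
--     commandc = bytes('08PS  ' + p, "utf-8")
--
--     # format each command byte directly as '\x??'
--     format_command = ''.join('\\x' + format(byte, '02x') for byte in commandc)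
--
--     # checksum arithmetically: 256 - (sum mod 256); a zero residue yields 256
--     checksum = 256 - sum(commandc) % 256
--
--     cs = hex(checksum)[2:].upper()
--     format_checksum = ''.join('\\x' + format(ord(ch), '02x') for ch in cs)
--
--     return "b'" + "\\x05\\x02" + format_command + format_checksum + "\\x03'"
-- ===== Notes on version B (the rewrite author's own statement) =====
-- stated objective: simpler
-- what changed: B replaces A's hex-encode/wrap/int(pair,16) summation and the 8-bit binary-string build-and-invert loop by direct byte arithmetic (checksum = 256 - sum(commandc) % 256, a zero residue giving 256 exactly as A does) and formats each byte straight to '\x??' instead of re-splitting a hex string; only the result value is kept, not A's string round-trips.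
import Mathlib
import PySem

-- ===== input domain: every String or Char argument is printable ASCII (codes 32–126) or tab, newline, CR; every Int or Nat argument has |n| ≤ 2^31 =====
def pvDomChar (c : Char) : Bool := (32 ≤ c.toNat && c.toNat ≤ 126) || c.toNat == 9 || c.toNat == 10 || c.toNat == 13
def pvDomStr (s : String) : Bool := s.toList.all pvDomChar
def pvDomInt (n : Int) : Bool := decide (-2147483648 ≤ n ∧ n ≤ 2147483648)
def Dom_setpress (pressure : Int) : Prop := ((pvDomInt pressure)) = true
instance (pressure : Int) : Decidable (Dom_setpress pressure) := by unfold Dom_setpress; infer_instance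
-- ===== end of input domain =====

-- B replaces A's hex-encode/wrap/int(pair,16) checksum summation and the 8-bit binary-string
-- build-and-invert loop by direct byte arithmetic (256 - sum % 256) and direct per-byte '\x??'
-- formatting (objective: simpler; same return value).
set_option maxRecDepth 10000


-- ===== PORT A =====
-- shared primitives for Python's hex machinery (used by both ports):
-- the two lowercase hex digits of a byte b < 256 (codecs.encode(_, 'hex') per byte / format(b, '02x'));
-- hex(n)[2:] for n ≥ 0 is ported as Nat.toDigits 16 n (lowercase base-16 digit string, exact)
def hexDigit (n : Nat) : Char := ['0','1','2','3','4','5','6','7','8','9','a','b','c','d','e','f'].getD n '0'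
def byteHex (b : Nat) : List Char := [hexDigit (b / 16), hexDigit (b % 16)]

-- while len(s) < w: s = "0" + s
def padTo (w : Nat) (s : List Char) : List Char :=
  if s.length < w then padTo w ('0' :: s) else s
termination_by w - s.length
decreasing_by simp; omega

-- textwrap.wrap(s, 2)
def chunk2 : List Char → List (List Char)
  | [] => []
  | [a] => [[a]]
  | a :: b :: r => [a, b] :: chunk2 r

-- codecs.encode(bytes(...), 'hex').decode('utf-8'): two lowercase hex digits per byte
def hexEncode (bs : List Nat) : List Char := (bs.map byteHex).flatten

-- '\\x' + '\\x'.join(s[i:i+2] for i in range(0, len(s), 2))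
def xJoinFmt (s : List Char) : List Char :=
  ['\\','x'] ++ PySem.Chars.join ['\\','x']
    ((PySem.List.pyRange 0 s.length 2).map (fun i => PySem.List.slice s (some i) (some (i + 2))))

-- A's 8-bit two's complement block: bin(x)[2:], zero-pad to 8 bits, invert each bit, int(_, 2) + 1
def twosComp (x : Int) : Int :=
  let binc := PySem.List.slice (PySem.Int.toBinChars0b x) (some 2) none
  let binc := padTo 8 binc
  let invert := binc.foldl (fun acc c => if c = '0' then acc ++ ['1'] else acc ++ ['0']) []
  (PySem.Int.ofCharsBase? invert 2).getD 0 + 1   -- int(invert, 2): always a valid binary string here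

def setpress (pressure : Int) : String :=
  let pres := PySem.Int.toChars (pressure * 10)
  let pres := padTo 4 pres
  let commandc : List Nat := (['0','8','P','S',' ',' '] ++ pres).map Char.toNat
  let hexcommand := hexEncode commandc
  let format_command := xJoinFmt hexcommand
  let pairs := chunk2 hexcommand
  let decimalsum : Int := pairs.foldl (fun acc p => acc + (PySem.Int.ofCharsBase? p 16).getD 0) 0
  let checksum : Int := PySem.Int.mod decimalsum 256
  let checksum2 : Int := twosComp checksum
  let hexcs := Nat.toDigits 16 checksum2.toNat
  let checksumarray := hexcs.foldl
    (fun arr c => if PySem.Chars.isalpha c then arr ++ [PySem.Chars.upperChar c] else arr ++ [c]) []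
  let checksumS := checksumarray.foldl (fun acc c => acc ++ [c]) ([] : List Char)
  let csBytes : List Nat := checksumS.map Char.toNat
  let format_checksum := xJoinFmt (hexEncode csBytes)
  let finalcommand :=
    ['\\','x','0','5','\\','x','0','2'] ++ format_command ++ format_checksum ++ ['\\','x','0','3']
  let finalcommand := PySem.Chars.stripChars (PySem.Chars.stripChars finalcommand ['\r']) ['\n']
  String.ofList (['b','\''] ++ finalcommand ++ ['\''])

-- ===== PORT B =====
def setpress_alt (pressure : Int) : String :=
  let p := PySem.Int.toChars (pressure * 10)
  let p := List.replicate (4 - p.length) '0' ++ p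
  let commandc : List Nat := (['0','8','P','S',' ',' '] ++ p).map Char.toNat
  let format_command := (commandc.map (fun b => ['\\','x'] ++ byteHex b)).flatten
  let checksum : Nat := 256 - (commandc.foldl (· + ·) 0) % 256
  let cs := PySem.Chars.upper (Nat.toDigits 16 checksum)
  let format_checksum := (cs.map (fun ch => ['\\','x'] ++ byteHex ch.toNat)).flatten
  String.ofList (['b','\'','\\','x','0','5','\\','x','0','2'] ++ format_command
    ++ format_checksum ++ ['\\','x','0','3','\''])


-- ===== PRECONDITION & SPEC =====
def Spec_setpress (pressure : Int) (out : String) : Prop := out = setpress_alt pressure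
instance (pressure : Int) (out : String) : Decidable (Spec_setpress pressure out) := by unfold Spec_setpress; infer_instance

-- ===== CLAIM (what is proved, stated in full; the proofs are below) =====
def Claim_equal_setpress : Prop := ∀ (pressure : Int), Dom_setpress pressure → Spec_setpress pressure (setpress pressure)

-- ===== LEMMAS AND PROOFS =====
lemma digitChar_lt (m : Nat) : (Nat.digitChar m).toNat < 256 := by
  rcases Nat.lt_or_ge m 16 with h | h
  · interval_cases m <;> decide
  · have h0 : Nat.digitChar m = '*' := by
      simp only [Nat.digitChar]
      rw [if_neg (by omega), if_neg (by omega), if_neg (by omega), if_neg (by omega),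
          if_neg (by omega), if_neg (by omega), if_neg (by omega), if_neg (by omega),
          if_neg (by omega), if_neg (by omega), if_neg (by omega), if_neg (by omega),
          if_neg (by omega), if_neg (by omega), if_neg (by omega), if_neg (by omega)]
    rw [h0]; decide

lemma toDigitsCore_lt (b : Nat) : ∀ (f n : Nat) (acc : List Char),
    (∀ c ∈ acc, c.toNat < 256) → ∀ c ∈ Nat.toDigitsCore b f n acc, c.toNat < 256 := by
  intro f
  induction f with
  | zero => intro n acc h; simpa [Nat.toDigitsCore] using h
  | succ f ih =>
    intro n acc h
    simp only [Nat.toDigitsCore]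
    split
    · intro c hc
      rcases List.mem_cons.mp hc with h1 | h1
      · subst h1; exact digitChar_lt _
      · exact h c h1
    · exact ih _ _ (by
        intro c hc
        rcases List.mem_cons.mp hc with h1 | h1
        · subst h1; exact digitChar_lt _
        · exact h c h1)

lemma toChars_lt (n : Int) : ∀ c ∈ PySem.Int.toChars n, c.toNat < 256 := by
  unfold PySem.Int.toChars
  split
  · intro c hc
    rcases List.mem_cons.mp hc with h1 | h1
    · subst h1; decide
    · exact toDigitsCore_lt 10 _ _ [] (by simp) c h1
  · exact toDigitsCore_lt 10 _ _ [] (by simp)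

lemma chunk2_hexEncode : ∀ bs : List Nat, chunk2 (hexEncode bs) = bs.map byteHex := by
  intro bs
  induction bs with
  | nil => rfl
  | cons b r ih =>
    simp only [hexEncode, List.map_cons, List.flatten_cons] at *
    show chunk2 (byteHex b ++ _) = _
    rw [show byteHex b = [hexDigit (b / 16), hexDigit (b % 16)] from rfl]
    simp only [List.cons_append, List.nil_append, chunk2]
    rw [ih]

lemma parse_byteHex : ∀ b : Nat, b < 256 → (PySem.Int.ofCharsBase? (byteHex b) 16).getD 0 = (b : Int) := by decide

lemma sum16 : ∀ (bs : List Nat) (acc : Int), (∀ b ∈ bs, b < 256) →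
    (bs.map byteHex).foldl (fun acc p => acc + (PySem.Int.ofCharsBase? p 16).getD 0) acc
      = acc + (bs.sum : Nat) := by
  intro bs
  induction bs with
  | nil => simp
  | cons b r ih =>
    intro acc h
    simp only [List.map_cons, List.foldl_cons, List.sum_cons]
    rw [parse_byteHex b (h b (by simp)), ih _ (fun x hx => h x (by simp [hx]))]
    push_cast; ring
lemma slice_two (xs : List Char) (k : Nat) :
    PySem.List.slice xs (some ((2 * k : Nat) : Int)) (some (((2 * k : Nat) : Int) + 2))
      = (xs.drop (2 * k)).take 2 := by
  have h := PySem.List.slice_natCast_add xs (2 * k) 2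
  simpa using h

lemma slices_pieces : ∀ ps : List (List Char), (∀ p ∈ ps, p.length = 2) →
    (List.range ps.length).map (fun k => ((ps.flatten).drop (2 * k)).take 2) = ps := by
  intro ps
  induction ps with
  | nil => simp
  | cons p r ih =>
    intro h
    have hp : p.length = 2 := h p (by simp)
    simp only [List.length_cons]
    rw [List.range_succ_eq_map]
    simp only [List.map_cons, List.map_map, List.flatten_cons]
    congr 1
    case _ =>
      rw [Nat.mul_zero, List.drop_zero, ← hp, List.take_left]
    case _ =>
      refine Eq.trans ?_ (ih (fun q hq => h q (by simp [hq])))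
      apply List.map_congr_left
      intro k _
      simp only [Function.comp_apply]
      rw [List.drop_append]
      rw [hp]
      have h1 : 2 * (k + 1) - 2 = 2 * k := by omega
      have h2 : List.drop (2 * (k + 1)) p = [] := by
        apply List.drop_eq_nil_of_le; omega
      rw [h1, h2, List.nil_append]
lemma join_flat : ∀ ps : List (List Char), ps ≠ [] →
    ['\\','x'] ++ PySem.Chars.join ['\\','x'] ps = (ps.map (fun p => ['\\','x'] ++ p)).flatten := by
  intro ps
  induction ps with
  | nil => simp
  | cons p r ih =>
    intro _
    cases r with
    | nil => rw [PySem.Chars.join_singleton]; simp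
    | cons q t =>
      rw [PySem.Chars.join_cons_cons]
      simp only [List.map_cons, List.flatten_cons] at *
      rw [← ih (by simp)]
      simp
lemma hexEncode_length (bs : List Nat) : (hexEncode bs).length = 2 * bs.length := by
  induction bs with
  | nil => rfl
  | cons b r ih =>
    have hb : (byteHex b).length = 2 := rfl
    simp only [hexEncode, List.map_cons, List.flatten_cons, List.length_append, List.length_cons] at ih ⊢
    rw [hb, ih]; omega

lemma fmt_eq (bs : List Nat) (h : bs ≠ []) :
    xJoinFmt (hexEncode bs) = (bs.map (fun b => ['\\','x'] ++ byteHex b)).flatten := by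
  have hn : 0 < bs.length := List.length_pos_of_ne_nil h
  unfold xJoinFmt
  rw [hexEncode_length]
  rw [show ((2 * bs.length : Nat) : Int) = 2 * (bs.length : Int) from by push_cast; ring]
  rw [PySem.List.pyRange_of_pos 0 (2 * (bs.length : Int)) (by norm_num)]
  rw [if_pos (by omega)]
  have hcount : (((2 * bs.length : Int) - 0 + 2 - 1) / 2).toNat = bs.length := by omega
  rw [hcount]
  have hmap : (List.range bs.length).map
      ((fun i => PySem.List.slice (hexEncode bs) (some i) (some (i + 2))) ∘ (fun k : Nat => (0 : Int) + 2 * k))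
      = (List.range bs.length).map (fun k => ((hexEncode bs).drop (2 * k)).take 2) := by
    apply List.map_congr_left
    intro k _
    simp only [Function.comp_apply]
    rw [show (0 : Int) + 2 * (k : Int) = ((2 * k : Nat) : Int) from by push_cast; ring]
    exact slice_two _ k
  rw [List.map_map, hmap]
  have hps : (List.range bs.length).map (fun k => ((hexEncode bs).drop (2 * k)).take 2) = bs.map byteHex := by
    have := slices_pieces (bs.map byteHex) (by intro p hp; simp only [List.mem_map] at hp; obtain ⟨b, _, hb⟩ := hp; rw [← hb]; rfl)
    simpa [hexEncode, List.length_map] using this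
  rw [hps, join_flat _ (by simpa using h), List.map_map]
  rfl
lemma strip_noop (X : List Char) (c : Char) (h1 : c ≠ '\\') (h2 : c ≠ '3') :
    PySem.Chars.stripChars ('\\' :: (X ++ ['\\','x','0','3'])) [c]
      = '\\' :: (X ++ ['\\','x','0','3']) := by
  dsimp only [PySem.Chars.stripChars]
  rw [List.dropWhile_cons_of_neg (by simpa using (Ne.symm h1))]
  rw [show ('\\' :: (X ++ ['\\','x','0','3'])).reverse = '3' :: ('\\' :: (X ++ ['\\','x','0'])).reverse from by simp]
  rw [List.dropWhile_cons_of_neg (by simpa using (Ne.symm h2))]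
  simp
lemma padTo_eq (w : Nat) : ∀ s : List Char, padTo w s = List.replicate (w - s.length) '0' ++ s := by
  intro s
  induction hn : w - s.length generalizing s with
  | zero =>
    rw [padTo]
    rw [if_neg (by omega)]
    simp
  | succ n ih =>
    rw [padTo, if_pos (by omega)]
    rw [ih ('0' :: s) (by simp only [List.length_cons]; omega)]
    rw [List.replicate_succ']
    simp

def twosComp' (x : Int) : Int :=
  let binc := PySem.List.slice (PySem.Int.toBinChars0b x) (some 2) none
  let binc := List.replicate (8 - binc.length) '0' ++ binc
  let invert := binc.foldl (fun acc c => if c = '0' then acc ++ ['1'] else acc ++ ['0']) []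
  (PySem.Int.ofCharsBase? invert 2).getD 0 + 1

lemma twosComp_eq_aux (x : Int) : twosComp x = twosComp' x := by
  dsimp only [twosComp, twosComp']
  rw [padTo_eq]

lemma twosComp_eq : ∀ x : Nat, x < 256 → twosComp (x : Int) = ((256 - x : Nat) : Int) := by
  intro x hx
  rw [twosComp_eq_aux]
  revert x hx
  decide
lemma tail_eq : ∀ m : Nat, m < 257 →
    xJoinFmt (hexEncode ((((Nat.toDigits 16 m).foldl
        (fun arr c => if PySem.Chars.isalpha c then arr ++ [PySem.Chars.upperChar c] else arr ++ [c]) []).foldl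
          (fun acc c => acc ++ [c]) ([] : List Char)).map Char.toNat))
      = ((PySem.Chars.upper (Nat.toDigits 16 m)).map (fun ch => ['\\','x'] ++ byteHex ch.toNat)).flatten := by
  decide

theorem main : ∀ p : Int, setpress p = setpress_alt p := by
  intro p
  dsimp only [setpress, setpress_alt]
  rw [padTo_eq 4]
  rw [chunk2_hexEncode]
  set bs : List Nat := ((['0','8','P','S',' ',' '] ++
    (List.replicate (4 - (PySem.Int.toChars (p * 10)).length) '0' ++ PySem.Int.toChars (p * 10))).map Char.toNat) with hbs_def
  have hbs : ∀ b ∈ bs, b < 256 := by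
    intro b hb
    rw [hbs_def] at hb
    simp only [List.mem_map, List.mem_append, List.mem_replicate] at hb
    obtain ⟨c, hc, rfl⟩ := hb
    rcases hc with hc | hc
    · fin_cases hc <;> decide
    · rcases hc with ⟨-, rfl⟩ | hc
      · decide
      · exact toChars_lt _ c hc
  rw [sum16 bs 0 hbs]
  rw [show ((0 : Int) + (bs.sum : Int)) = ((bs.sum : Nat) : Int) from by ring]
  rw [show (256 : Int) = ((256 : Nat) : Int) from rfl, PySem.Int.mod_natCast]
  rw [twosComp_eq (bs.sum % 256) (by omega)]
  rw [Int.toNat_natCast]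
  rw [tail_eq (256 - bs.sum % 256) (by omega)]
  rw [fmt_eq bs (by rw [hbs_def]; simp)]
  rw [← List.sum_eq_foldl]
  generalize (List.map (fun b => ['\\','x'] ++ byteHex b) bs).flatten = F
  generalize (List.map (fun ch => ['\\','x'] ++ byteHex ch.toNat)
      (PySem.Chars.upper (Nat.toDigits 16 (256 - bs.sum % 256)))).flatten = T
  rw [show ['\\','x','0','5','\\','x','0','2'] ++ F ++ T ++ ['\\','x','0','3']
      = '\\' :: ((['x','0','5','\\','x','0','2'] ++ F ++ T) ++ ['\\','x','0','3']) from by simp]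
  rw [strip_noop _ '\r' (by decide) (by decide), strip_noop _ '\n' (by decide) (by decide)]
  apply congrArg
  simp

-- ===== VERDICT (by name: the statement is the Claim_ definition above) =====
theorem setpress_spec : Claim_equal_setpress := by
  intro pressure _
  show setpress pressure = setpress_alt pressure
  exact main pressure
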